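-- pv_equiv track=rewrite | github.com/Consultoria-Bethesda/resume-analyzer-backend | app/routes/cv_analysis.py | suggest_section
-- ===== SOURCE A (Python) =====
-- def suggest_section(keyword: str) -> str:
--     """
--     Sugere a seção mais apropriada para adicionar cada tipo de palavra-chave
--     """
--     keyword_lower = keyword.lower()
--
--     # Mapeamento de palavras-chave para seções sugeridas
--     section_mapping = {
--         'technical': ['sql', 'python', 'java', 'docker', 'aws', 'azure', 'git'],
--         'methodologies': ['scrum', 'kanban', 'agile', 'lean', 'xp'],
--         'tools': ['jira', 'confluence', 'trello', 'miro', 'figma'],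
--         'business': ['product owner', 'stakeholder', 'backlog', 'kpi', 'roi'],
--         'certifications': ['pmp', 'psm', 'safe', 'cspo'],
--     }
--
--     for section, keywords in section_mapping.items():
--         if any(k in keyword_lower for k in keywords):
--             if section == 'technical':
--                 return "Habilidades Técnicas"
--             elif section == 'methodologies':
--                 return "Metodologias"
--             elif section == 'tools':
--                 return "Ferramentas"
--             elif section == 'business':
--                 return "Experiência Profissional"
--             elif section == 'certifications':
--                 return "Certificações"
--
--     return "Experiência Profissional"
-- ===== SOURCE B (Python) =====
-- # B: two staged passes — collect the section rank of EVERY matching substring, then pick the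
-- # label of the best (minimum) rank; no early-exit dispatch loop.
-- _SUBS = [('sql', 0), ('python', 0), ('java', 0), ('docker', 0), ('aws', 0), ('azure', 0), ('git', 0),
--          ('scrum', 1), ('kanban', 1), ('agile', 1), ('lean', 1), ('xp', 1),
--          ('jira', 2), ('confluence', 2), ('trello', 2), ('miro', 2), ('figma', 2),
--          ('product owner', 3), ('stakeholder', 3), ('backlog', 3), ('kpi', 3), ('roi', 3),
--          ('pmp', 4), ('psm', 4), ('safe', 4), ('cspo', 4)]
-- _LABELS = ["Habilidades Técnicas", "Metodologias", "Ferramentas",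
--            "Experiência Profissional", "Certificações"]
--
-- def suggest_section(keyword: str) -> str:
--     keyword_lower = keyword.lower()
--     ranks = [g for sub, g in _SUBS if sub in keyword_lower]
--     if ranks:
--         return _LABELS[min(ranks)]
--     return "Experiência Profissional"
-- ===== Notes on version B (the rewrite author's own statement) =====
-- stated objective: alternative
-- what changed: Replaces the early-exit loop over a grouped dict with if/elif dispatch by two staged passes: exhaustively collect the section rank of every matching substring, then return the label of the minimum rank.
import Mathlib
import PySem

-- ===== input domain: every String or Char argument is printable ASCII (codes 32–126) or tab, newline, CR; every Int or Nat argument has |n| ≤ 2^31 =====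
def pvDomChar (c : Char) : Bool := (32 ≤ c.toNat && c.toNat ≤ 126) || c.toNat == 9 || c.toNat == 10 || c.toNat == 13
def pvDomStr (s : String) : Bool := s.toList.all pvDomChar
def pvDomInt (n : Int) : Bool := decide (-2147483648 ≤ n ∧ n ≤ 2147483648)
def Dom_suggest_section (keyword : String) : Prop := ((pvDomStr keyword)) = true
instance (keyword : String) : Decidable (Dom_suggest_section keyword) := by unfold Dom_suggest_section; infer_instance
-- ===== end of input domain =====

-- B replaces A's early-exit grouped-dict loop by two staged passes: collect the rank of every
-- matching substring, then return the label of the minimum rank (objective: alternative).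

-- ===== PORT A =====
-- the dict literal, in insertion order
def pvSectionMapping : List (String × List String) :=
  [("technical", ["sql", "python", "java", "docker", "aws", "azure", "git"]),
   ("methodologies", ["scrum", "kanban", "agile", "lean", "xp"]),
   ("tools", ["jira", "confluence", "trello", "miro", "figma"]),
   ("business", ["product owner", "stakeholder", "backlog", "kpi", "roi"]),
   ("certifications", ["pmp", "psm", "safe", "cspo"])]

-- the 'for section, keywords in …' loop with the if/elif chain inside
def pvALoop (kl : String) : List (String × List String) → String
  | [] => "Experiência Profissional"
  | (sec, keywords) :: rest =>
    if keywords.any (fun k => PySem.Str.isIn k kl) then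
      if sec == "technical" then "Habilidades Técnicas"
      else if sec == "methodologies" then "Metodologias"
      else if sec == "tools" then "Ferramentas"
      else if sec == "business" then "Experiência Profissional"
      else if sec == "certifications" then "Certificações"
      else pvALoop kl rest   -- no branch fires: the Python loop continues
    else pvALoop kl rest

def suggest_section (keyword : String) : String :=
  pvALoop (PySem.Str.lower keyword) pvSectionMapping

-- ===== PORT B =====
-- the flat (substring, section-rank) table _SUBS of Source B
def pvSubs : List (String × Nat) :=
  [("sql", 0), ("python", 0), ("java", 0), ("docker", 0), ("aws", 0), ("azure", 0), ("git", 0),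
   ("scrum", 1), ("kanban", 1), ("agile", 1), ("lean", 1), ("xp", 1),
   ("jira", 2), ("confluence", 2), ("trello", 2), ("miro", 2), ("figma", 2),
   ("product owner", 3), ("stakeholder", 3), ("backlog", 3), ("kpi", 3), ("roi", 3),
   ("pmp", 4), ("psm", 4), ("safe", 4), ("cspo", 4)]

def pvLabels : List String :=
  ["Habilidades Técnicas", "Metodologias", "Ferramentas",
   "Experiência Profissional", "Certificações"]

-- the comprehension's filter-and-keep step
def pvHit (kl : String) (p : String × Nat) : Option Nat :=
  if PySem.Str.isIn p.1 kl then some p.2 else none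

def suggest_section_alt (keyword : String) : String :=
  let kl := PySem.Str.lower keyword
  let ranks := pvSubs.filterMap (pvHit kl)
  match PySem.List.min? ranks (fun x => x) with
  | some m => pvLabels.getD m "Experiência Profissional"   -- min(ranks) is always < 5, so getD is exact
  | none => "Experiência Profissional"

-- ===== PRECONDITION & SPEC =====
def Spec_suggest_section (keyword : String) (out : String) : Prop := out = suggest_section_alt keyword
instance (keyword : String) (out : String) : Decidable (Spec_suggest_section keyword out) := by unfold Spec_suggest_section; infer_instance

-- ===== CLAIM (what is proved, stated in full; the proofs are below) =====
def Claim_equal_suggest_section : Prop := ∀ (keyword : String), Dom_suggest_section keyword → Spec_suggest_section keyword (suggest_section keyword)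

-- ===== LEMMAS AND PROOFS =====

-- every rank the comprehension keeps from a group-g block followed by later groups is ≥ g
theorem pvHit_ge (kl : String) (g : Nat) (ks : List String) (rest : List (String × Nat))
    (hrest : ∀ p ∈ rest, g ≤ p.2) :
    ∀ x ∈ ((ks.map (fun k => (k, g))) ++ rest).filterMap (pvHit kl), g ≤ x := by
  intro x hx
  obtain ⟨p, hp, hpx⟩ := List.mem_filterMap.mp hx
  have hx2 : x = p.2 := by
    unfold pvHit at hpx
    split at hpx
    · exact (Option.some.inj hpx).symm
    · cases hpx
  subst hx2
  rcases List.mem_append.mp hp with h | h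
  · obtain ⟨k, _, rfl⟩ := List.mem_map.mp h
    exact le_refl g
  · exact hrest p h

theorem pvFoldl_min_eq (g : Nat) (t : List Nat) (h : ∀ x ∈ t, g ≤ x) :
    t.foldl min g = g := by
  induction t with
  | nil => rfl
  | cons x t ih =>
    simp only [List.foldl_cons]
    rw [Nat.min_eq_left (h x (List.mem_cons_self ..))]
    exact ih (fun y hy => h y (List.mem_cons_of_mem _ hy))

-- the minimum over a group-g block followed by later (≥ g) groups: 'some g' if the
-- group has a match, otherwise the minimum over the rest
theorem pvMin_group (kl : String) (g : Nat) (ks : List String) (rest : List (String × Nat))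
    (hrest : ∀ p ∈ rest, g ≤ p.2) :
    PySem.List.min? (((ks.map (fun k => (k, g))) ++ rest).filterMap (pvHit kl)) (fun x => x)
      = if ks.any (fun k => PySem.Str.isIn k kl) then some g
        else PySem.List.min? (rest.filterMap (pvHit kl)) (fun x => x) := by
  induction ks with
  | nil => simp
  | cons k ks ih =>
    simp only [List.map_cons, List.cons_append, List.filterMap_cons, List.any_cons,
      Bool.or_eq_true]
    cases h : PySem.Str.isIn k kl with
    | false =>
      have hn : pvHit kl (k, g) = none := by simp only [pvHit, h, Bool.false_eq_true, if_false]
      rw [hn]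
      simp only [h, Bool.false_eq_true, false_or]
      exact ih
    | true =>
      have hs : pvHit kl (k, g) = some g := by simp only [pvHit, h, if_true]
      rw [hs]
      simp only [h, true_or, if_pos]
      rw [PySem.List.min?_id_cons]
      rw [pvFoldl_min_eq g _ (pvHit_ge kl g ks rest hrest)]

-- ===== VERDICT (by name: the statement is the Claim_ definition above) =====
theorem suggest_section_spec : Claim_equal_suggest_section := by
  unfold Claim_equal_suggest_section
  intro keyword _
  unfold Spec_suggest_section suggest_section suggest_section_alt
  set kl := PySem.Str.lower keyword
  show pvALoop kl pvSectionMapping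
      = match PySem.List.min? (pvSubs.filterMap (pvHit kl)) (fun x => x) with
        | some m => pvLabels.getD m "Experiência Profissional"
        | none => "Experiência Profissional"
  have hS : pvSubs =
      (["sql", "python", "java", "docker", "aws", "azure", "git"].map (fun k => (k, 0)) ++
      (["scrum", "kanban", "agile", "lean", "xp"].map (fun k => (k, 1)) ++
      (["jira", "confluence", "trello", "miro", "figma"].map (fun k => (k, 2)) ++
      (["product owner", "stakeholder", "backlog", "kpi", "roi"].map (fun k => (k, 3)) ++
      (["pmp", "psm", "safe", "cspo"].map (fun k => (k, (4 : Nat))) ++ []))))) := by rfl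
  rw [hS, pvMin_group _ _ _ _ (by decide), pvMin_group _ _ _ _ (by decide),
      pvMin_group _ _ _ _ (by decide), pvMin_group _ _ _ _ (by decide),
      pvMin_group _ _ _ _ (by decide)]
  simp only [pvSectionMapping, pvALoop, String.reduceBEq, Bool.false_eq_true, if_false, if_true]
  split_ifs <;> rfl
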